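-- pv_equiv track=rewrite | github.com/PGM-Lab/InferPy | inferpy/util/ops.py | fix_shape
-- ===== SOURCE A (Python) =====
-- def fix_shape(s):
--
--     """ Transforms a shape list into a standard InferPy shape format. """
--
--     ret = []
--
--     for i in range(0,len(s)):
--         if i in [0, len(s)-1] or s[i] != 1:
--             ret.append(s[i])
--
--     if len(ret) == 0:
--         return [1]
--
--     return ret
-- ===== SOURCE B (Python) =====
-- def fix_shape(s):
--
--     """ Transforms a shape list into a standard InferPy shape format. """
--
--     core = [x for x in s if x != 1]
--
--     if len(s) == 0:
--         return [1]
--     if s[0] == 1: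
--         core.insert(0, 1)
--     if len(s) > 1 and s[-1] == 1:
--         core.append(1)
--     return core
-- ===== Notes on version B (the rewrite author's own statement) =====
-- stated objective: alternative
-- what changed: Instead of A's indexed loop with a per-index 'i in [0, len(s)-1]' endpoint-membership test, B first drops every 1 globally with a position-blind filter and then repairs the two boundaries afterwards, re-inserting a leading/trailing 1 only when the corresponding endpoint of s was 1.
import Mathlib
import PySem

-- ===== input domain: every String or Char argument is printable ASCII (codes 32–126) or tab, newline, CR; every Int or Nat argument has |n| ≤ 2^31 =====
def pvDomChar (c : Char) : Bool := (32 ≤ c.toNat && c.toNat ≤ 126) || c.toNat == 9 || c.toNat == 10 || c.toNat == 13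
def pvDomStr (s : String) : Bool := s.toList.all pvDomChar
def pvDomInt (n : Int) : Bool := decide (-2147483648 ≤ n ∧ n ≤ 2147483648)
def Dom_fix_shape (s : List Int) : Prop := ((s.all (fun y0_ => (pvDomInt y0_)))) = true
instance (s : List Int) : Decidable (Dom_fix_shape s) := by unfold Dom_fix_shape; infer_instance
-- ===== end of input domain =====

-- B replaces A's indexed loop with its per-index endpoint test by a position-blind
-- global filter of 1s followed by boundary repair (objective: alternative).

-- ===== PORT A =====
-- literal port of A: loop i over range(0, len(s)), keep s[i] when i is an endpoint or s[i] != 1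
def fix_shape (s : List Int) : List Int :=
  let ret : List Int :=
    (PySem.List.pyRange 0 (PySem.List.len s)).foldl
      (fun ret i =>
        if i = 0 ∨ i = PySem.List.len s - 1 ∨ PySem.List.pyGetD s i 0 ≠ 1 then
          ret ++ [PySem.List.pyGetD s i 0]
        else ret) []
  if ret.length = 0 then [1] else ret

-- ===== PORT B =====
-- literal port of B: filter all 1s, then re-insert a boundary 1 where an endpoint was 1
def fix_shape_alt (s : List Int) : List Int :=
  let core := s.filter (fun x => decide (x ≠ 1))
  if PySem.List.len s = 0 then [1]
  else
    let core := if PySem.List.pyGetD s 0 0 = 1 then PySem.List.insert core 0 1 else core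
    let core := if 1 < PySem.List.len s ∧ PySem.List.pyGetD s (-1) 0 = 1 then core ++ [1] else core
    core

-- ===== PRECONDITION & SPEC =====
def Spec_fix_shape (s : List Int) (out : List Int) : Prop := out = fix_shape_alt s
instance (s : List Int) (out : List Int) : Decidable (Spec_fix_shape s out) := by unfold Spec_fix_shape; infer_instance

-- ===== CLAIM (what is proved, stated in full; the proofs are below) =====
def Claim_equal_fix_shape : Prop := ∀ (s : List Int), Dom_fix_shape s → Spec_fix_shape s (fix_shape s)

-- ===== LEMMAS AND PROOFS =====

-- 'if p(x): out.append(f(x))' loop shape, Prop-condition variant of PySem.List.foldl_append_if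
theorem pvFoldlAppendIf {α β : Type} (p : α → Prop) [DecidablePred p] (f : α → β)
    (l : List α) (acc : List β) :
    l.foldl (fun acc x => if p x then acc ++ [f x] else acc) acc
      = acc ++ (l.filter (fun x => decide (p x))).map f := by
  induction l generalizing acc with
  | nil => simp
  | cons x t ih => by_cases h : p x <;> simp [h, ih]

theorem pvFilterMapComm (f : Int → Int) (l : List Int) :
    (l.filter (fun i => decide (f i ≠ 1))).map f
      = (l.map f).filter (fun x => decide (x ≠ 1)) := by
  induction l with
  | nil => simp
  | cons x t ih =>
    by_cases h : f x = 1
    · simpa [List.filter_cons, h] using ih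
    · simpa [List.filter_cons, h] using ih

theorem pvGetDLast (u : List Int) (x d : Int) :
    PySem.List.pyGetD (u ++ [x]) (-1) d = x := by
  simp [PySem.List.pyGetD, PySem.List.pyGet?, PySem.List.pyIdx?]

theorem pvMapRange (a b : Int) (m : List Int) :
    (PySem.List.pyRange 1 ((m.length : Int) + 1)).map
        (fun i => PySem.List.pyGetD (a :: m ++ [b]) i 0) = m := by
  have hdl : (a :: m ++ [b]).dropLast = a :: m := by
    simpa using List.dropLast_concat (l₁ := a :: m) (b := b)
  have hlen : PySem.List.len ((a :: m ++ [b]).dropLast) = (m.length : Int) + 1 := by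
    rw [hdl]; simp [PySem.List.len]
  have hbase := PySem.List.map_pyGetD_pyRange ((a :: m ++ [b]).dropLast) 0 (a := 1) (by norm_num)
  rw [hlen, hdl] at hbase
  have hcong : ∀ i ∈ PySem.List.pyRange 1 ((m.length : Int) + 1),
      PySem.List.pyGetD (a :: m ++ [b]) i 0 = PySem.List.pyGetD (a :: m) i 0 := by
    intro i hi
    rw [PySem.List.mem_pyRange_one] at hi
    rw [PySem.List.pyGetD_of_nonneg _ _ (by omega), PySem.List.pyGetD_of_nonneg _ _ (by omega)]
    have hlt : i.toNat < (a :: m).length := by simp; omega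
    have : (a :: m ++ [b]) = (a :: m) ++ [b] := by simp
    rw [this, List.getD_append _ _ _ _ hlt]
  rw [List.map_congr_left hcong, hbase]
  simp

theorem pvALong (a b : Int) (m : List Int) :
    fix_shape (a :: m ++ [b]) = a :: (m.filter (fun x => decide (x ≠ 1)) ++ [b]) := by
  have hsl : PySem.List.len (a :: m ++ [b]) = (m.length : Int) + 2 := by
    simp [PySem.List.len]; omega
  have hlast : PySem.List.pyGetD (a :: (m ++ [b])) ((m.length : Int) + 1) 0 = b := by
    have h1 : ((m.length : Int) + 1) = (((a :: m).length : Nat) : Int) := by simp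
    rw [h1, PySem.List.pyGetD_natCast, show (a :: (m ++ [b])) = (a :: m) ++ [b] from rfl,
        List.getD_eq_getElem _ _ (by simp)]
    simp
  have hmid : ∀ (acc : List Int),
      List.foldl (fun ret i =>
          if i = 0 ∨ i = (m.length : Int) + 1 ∨ PySem.List.pyGetD (a :: m ++ [b]) i 0 ≠ 1 then
            ret ++ [PySem.List.pyGetD (a :: m ++ [b]) i 0]
          else ret) acc (PySem.List.pyRange 1 ((m.length : Int) + 1))
        = acc ++ (m.filter (fun x => decide (x ≠ 1))).map id := by
    intro acc
    rw [PySem.List.foldl_congr_mem _ _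
      (fun ret i => if PySem.List.pyGetD (a :: m ++ [b]) i 0 ≠ 1 then
          ret ++ [PySem.List.pyGetD (a :: m ++ [b]) i 0] else ret) _
      (by
        intro acc' i hi
        rw [PySem.List.mem_pyRange_one] at hi
        have h1 : ¬ (i = 0) := by omega
        have h2 : ¬ (i = (m.length : Int) + 1) := by omega
        simp only [h1, h2, false_or])]
    rw [pvFoldlAppendIf, pvFilterMapComm, pvMapRange]
    simp
  unfold fix_shape
  rw [hsl,
      show ((m.length : Int) + 2 - 1) = (m.length : Int) + 1 from by ring,
      show ((m.length : Int) + 2) = ((m.length : Int) + 1) + 1 from by ring,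
      PySem.List.pyRange_one_cons (by omega),
      show (0 : Int) + 1 = 1 from by ring,
      PySem.List.pyRange_one_succ_right (by omega)]
  simp only [List.foldl_cons, List.foldl_append, List.foldl_nil]
  rw [hmid]
  simp [hlast]

theorem pvBLong (a b : Int) (m : List Int) :
    fix_shape_alt (a :: m ++ [b]) = a :: (m.filter (fun x => decide (x ≠ 1)) ++ [b]) := by
  unfold fix_shape_alt
  have hlen : PySem.List.len (a :: m ++ [b]) = (m.length : Int) + 2 := by
    simp [PySem.List.len]; omega
  have h0 : PySem.List.pyGetD (a :: m ++ [b]) 0 0 = a := by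
    rw [PySem.List.pyGetD_of_nonneg _ _ (by norm_num)]; rfl
  have hl : PySem.List.pyGetD (a :: m ++ [b]) (-1) 0 = b := by
    rw [show (a :: m ++ [b]) = (a :: m) ++ [b] from by simp, pvGetDLast]
  have hfil : (a :: m ++ [b]).filter (fun x => decide (x ≠ 1))
      = (if a = 1 then [] else [a]) ++ m.filter (fun x => decide (x ≠ 1))
          ++ (if b = 1 then [] else [b]) := by
    by_cases ha : a = 1 <;> by_cases hb : b = 1 <;>
      simp [ha, hb]
  simp only [hlen, h0, hl, hfil]
  rw [if_neg (by omega)]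
  by_cases ha : a = 1 <;> by_cases hb : b = 1 <;>
    simp [ha, hb, PySem.List.insert_zero,
      show (1 : Int) < (m.length : Int) + 2 from by omega]

theorem pvSingle (a : Int) : fix_shape [a] = [a] := by
  unfold fix_shape
  rw [show PySem.List.len [a] = 1 by rfl]
  rw [show PySem.List.pyRange 0 1 = [0] by decide]
  simp [PySem.List.pyGetD, PySem.List.pyGet?, PySem.List.pyIdx?]

theorem pvBSingle (a : Int) : fix_shape_alt [a] = [a] := by
  unfold fix_shape_alt
  rw [show PySem.List.len [a] = 1 from rfl]
  rw [if_neg (by norm_num)]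
  have h0 : PySem.List.pyGetD [a] 0 0 = a := by
    rw [PySem.List.pyGetD_of_nonneg _ _ (by norm_num)]; rfl
  simp only [h0]
  rw [if_neg (by rintro ⟨h, -⟩; omega)]
  by_cases ha : a = 1 <;> simp [ha, PySem.List.insert_zero]

-- ===== VERDICT (by name: the statement is the Claim_ definition above) =====
theorem fix_shape_spec : Claim_equal_fix_shape := by
  intro s _
  show fix_shape s = fix_shape_alt s
  rcases s with _ | ⟨a, t⟩
  · decide
  · rcases List.eq_nil_or_concat t with rfl | ⟨m, b, rfl⟩
    · rw [pvSingle, pvBSingle]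
    · rw [show a :: m.concat b = a :: m ++ [b] by simp, pvALong, pvBLong]
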